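-- pv_equiv track=rewrite | github.com/idoerr/challenges | adventofcode2024/day21solution.py | preprocess_grid_to_directions
-- ===== SOURCE A (Python) =====
-- def preprocess_grid_to_directions(button_grid, blank_point):
--     lookup_map = {}
--     # Iterate through each [row, col] combination in the grid.
--     # Iterate through every permutation of pair points in the gride
--     for i_row_1, row_1 in enumerate(button_grid):
--         for i_col_1, char_1 in enumerate(row_1):
--
--             for i_row_2, row_2 in enumerate(button_grid):
--                 for i_col_2, char_2 in enumerate(row_2):
--
--                     start_point = (i_row_1, i_col_1)
--                     end_point = (i_row_2, i_col_2)
--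
--                     direction_permutes = generate_direction_commands(start_point, end_point, blank_point)
--
--                     lookup_map[(char_1, char_2)] = direction_permutes
--     return lookup_map
--
-- def is_valid_direction_set(directions, start_point, blank_point):
--     cur_point = start_point
--     for x in directions:
--         if x == '^':
--             cur_point = cur_point[0] - 1, cur_point[1]
--         elif x == 'v':
--             cur_point = cur_point[0] + 1, cur_point[1]
--         elif x == '<':
--             cur_point = cur_point[0], cur_point[1] - 1
--         elif x == '>':
--             cur_point = cur_point[0], cur_point[1] + 1
--
--         if cur_point == blank_point:
--             return False
--     return True
--
-- def generate_direction_commands(start_point, end_point, blank_point):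
--     row_distance = end_point[0] - start_point[0]
--     col_distance = end_point[1] - start_point[1]
--
--     if col_distance > 0:
--         horizontal_dirs = '>' * abs(col_distance)
--     else:
--         horizontal_dirs = '<' * abs(col_distance)
--
--     if row_distance < 0:
--         vertical_dirs = '^' * abs(row_distance)
--     else:
--         vertical_dirs = 'v' * abs(row_distance)
--
--     possible_combos = [horizontal_dirs + vertical_dirs + 'A', vertical_dirs + horizontal_dirs + 'A']
--     # filter out combinations where we hit the blank point
--     return list(filter(lambda x: is_valid_direction_set(x, start_point, blank_point), possible_combos ))
-- ===== SOURCE B (Python) =====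
-- def _hseg(row, c_from, c_to, p):
--     # blank p lies on the horizontal segment of row `row` from col c_from to c_to, start cell excluded
--     return p[0] == row and min(c_from, c_to) <= p[1] <= max(c_from, c_to) and p[1] != c_from
--
-- def _vseg(col, r_from, r_to, p):
--     # blank p lies on the vertical segment of col `col` from row r_from to r_to, start cell excluded
--     return p[1] == col and min(r_from, r_to) <= p[0] <= max(r_from, r_to) and p[0] != r_from
--
-- def _paths(start, end, blank):
--     dr = end[0] - start[0]
--     dc = end[1] - start[1]
--     horiz = ('>' if dc > 0 else '<') * abs(dc)
--     vert = ('^' if dr < 0 else 'v') * abs(dr)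
--     res = []
--     if not (_hseg(start[0], start[1], end[1], blank)
--             or _vseg(end[1], start[0], end[0], blank) or blank == end):
--         res.append(horiz + vert + 'A')
--     if not (_vseg(start[1], start[0], end[0], blank)
--             or _hseg(end[0], start[1], end[1], blank) or blank == end):
--         res.append(vert + horiz + 'A')
--     return res
--
-- def preprocess_grid_to_directions(button_grid, blank_point):
--     pos = {}
--     for i, row in enumerate(button_grid):
--         for j, ch in enumerate(row):
--             pos[ch] = (i, j)
--     return {(c1, c2): _paths(p1, p2, blank_point)
--             for c1, p1 in pos.items() for c2, p2 in pos.items()}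
-- ===== Notes on version B (the rewrite author's own statement) =====
-- stated objective: faster
-- what changed: B builds a char->position index in one grid pass and enumerates pairs of distinct characters instead of all pairs of grid cells, and decides whether a candidate path hits the blank key by a closed-form segment test instead of simulating the path step by step.
import Mathlib
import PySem

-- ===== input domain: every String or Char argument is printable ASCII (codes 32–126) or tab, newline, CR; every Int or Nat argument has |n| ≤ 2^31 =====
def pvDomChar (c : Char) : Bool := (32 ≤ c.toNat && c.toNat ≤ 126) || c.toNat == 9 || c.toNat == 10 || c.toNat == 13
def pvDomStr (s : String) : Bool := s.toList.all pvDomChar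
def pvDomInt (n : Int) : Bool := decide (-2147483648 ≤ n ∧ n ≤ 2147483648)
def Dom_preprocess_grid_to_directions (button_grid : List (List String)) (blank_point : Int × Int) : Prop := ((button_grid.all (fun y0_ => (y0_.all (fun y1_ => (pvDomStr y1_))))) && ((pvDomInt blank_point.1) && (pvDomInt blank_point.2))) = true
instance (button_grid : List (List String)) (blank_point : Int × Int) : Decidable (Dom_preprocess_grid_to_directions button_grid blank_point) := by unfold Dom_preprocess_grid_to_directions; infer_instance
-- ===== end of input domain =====

-- B builds a char->position index in one grid pass and enumerates pairs of distinct characters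
-- instead of all pairs of grid cells, and decides whether a candidate path hits the blank key by
-- a closed-form segment test instead of simulating the path step by step (objective: faster).

-- ===== PORT A =====
-- is_valid_direction_set: the Python for-loop with early return, as structural recursion over the chars
def pvSimValid (blank : Int × Int) : List Char → (Int × Int) → Bool
  | [], _ => true
  | x :: rest, cur =>
    let cur' :=
      if x = '^' then (cur.1 - 1, cur.2)
      else if x = 'v' then (cur.1 + 1, cur.2)
      else if x = '<' then (cur.1, cur.2 - 1)
      else if x = '>' then (cur.1, cur.2 + 1)
      else cur
    if cur' = blank then false else pvSimValid blank rest cur'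

def is_valid_direction_set (directions : String) (start_point blank_point : Int × Int) : Bool :=
  pvSimValid blank_point directions.toList start_point

def generate_direction_commands (start_point end_point blank_point : Int × Int) : List String :=
  let row_distance := end_point.1 - start_point.1
  let col_distance := end_point.2 - start_point.2
  let horizontal_dirs :=
    if col_distance > 0 then List.replicate col_distance.natAbs '>'
    else List.replicate col_distance.natAbs '<'
  let vertical_dirs :=
    if row_distance < 0 then List.replicate row_distance.natAbs '^'
    else List.replicate row_distance.natAbs 'v'
  let possible_combos := [String.ofList (horizontal_dirs ++ vertical_dirs ++ ['A']),
                          String.ofList (vertical_dirs ++ horizontal_dirs ++ ['A'])]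
  possible_combos.filter (fun x => is_valid_direction_set x start_point blank_point)

def preprocess_grid_to_directions (button_grid : List (List String)) (blank_point : Int × Int) : List (String × String × List String) :=
  let lookup_map : PySem.Dict (String × String) (List String) :=
    (PySem.List.enumerate button_grid 0).foldl (fun d p =>
      (PySem.List.enumerate p.2 0).foldl (fun d q =>
        (PySem.List.enumerate button_grid 0).foldl (fun d r =>
          (PySem.List.enumerate r.2 0).foldl (fun d t =>
            d.insert (q.2, t.2) (generate_direction_commands (p.1, q.1) (r.1, t.1) blank_point)) d) d) d)
      PySem.Dict.empty
  lookup_map.items.map (fun p => (p.1.1, p.1.2, p.2))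

-- ===== PORT B =====
-- blank lies on the horizontal run of row `row` from column cFrom to cTo (start cell excluded)
def pvHseg (row cFrom cTo : Int) (p : Int × Int) : Bool :=
  decide (p.1 = row ∧ min cFrom cTo ≤ p.2 ∧ p.2 ≤ max cFrom cTo ∧ p.2 ≠ cFrom)

-- blank lies on the vertical run of column `col` from row rFrom to rTo (start cell excluded)
def pvVseg (col rFrom rTo : Int) (p : Int × Int) : Bool :=
  decide (p.2 = col ∧ min rFrom rTo ≤ p.1 ∧ p.1 ≤ max rFrom rTo ∧ p.1 ≠ rFrom)

def pvPaths (start_point end_point blank : Int × Int) : List String :=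
  let dr := end_point.1 - start_point.1
  let dc := end_point.2 - start_point.2
  let horiz := List.replicate dc.natAbs (if dc > 0 then '>' else '<')
  let vert := List.replicate dr.natAbs (if dr < 0 then '^' else 'v')
  (if !(pvHseg start_point.1 start_point.2 end_point.2 blank
        || pvVseg end_point.2 start_point.1 end_point.1 blank
        || blank == end_point)
   then [String.ofList (horiz ++ vert ++ ['A'])] else []) ++
  (if !(pvVseg start_point.2 start_point.1 end_point.1 blank
        || pvHseg end_point.1 start_point.2 end_point.2 blank
        || blank == end_point)
   then [String.ofList (vert ++ horiz ++ ['A'])] else [])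

def preprocess_grid_to_directions_alt (button_grid : List (List String)) (blank_point : Int × Int) : List (String × String × List String) :=
  let pos : PySem.Dict String (Int × Int) :=
    (PySem.List.enumerate button_grid 0).foldl (fun d p =>
      (PySem.List.enumerate p.2 0).foldl (fun d q => d.insert q.2 (p.1, q.1)) d)
      PySem.Dict.empty
  let lookup : PySem.Dict (String × String) (List String) :=
    pos.items.foldl (fun d x =>
      pos.items.foldl (fun d y => d.insert (x.1, y.1) (pvPaths x.2 y.2 blank_point)) d)
      PySem.Dict.empty
  lookup.items.map (fun p => (p.1.1, p.1.2, p.2))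

-- ===== PRECONDITION & SPEC =====
def Spec_preprocess_grid_to_directions (button_grid : List (List String)) (blank_point : Int × Int) (out : List (String × String × List String)) : Prop := out = preprocess_grid_to_directions_alt button_grid blank_point
instance (button_grid : List (List String)) (blank_point : Int × Int) (out : List (String × String × List String)) : Decidable (Spec_preprocess_grid_to_directions button_grid blank_point out) := by unfold Spec_preprocess_grid_to_directions; infer_instance

-- ===== CLAIM (what is proved, stated in full; the proofs are below) =====
def Claim_equal_preprocess_grid_to_directions : Prop := ∀ (button_grid : List (List String)) (blank_point : Int × Int), Dom_preprocess_grid_to_directions button_grid blank_point → Spec_preprocess_grid_to_directions button_grid blank_point (preprocess_grid_to_directions button_grid blank_point)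

-- ===== LEMMAS AND PROOFS =====

-- ---- Part 1: the step simulation of a candidate path equals the closed-form segment test ----

lemma pv_sim_right (b1 b2 : Int) : ∀ (n : Nat) (rest : List Char) (c1 c2 : Int),
    pvSimValid (b1, b2) (List.replicate n '>' ++ rest) (c1, c2) =
      ((!decide (b1 = c1 ∧ c2 < b2 ∧ b2 ≤ c2 + (n : Int))) && pvSimValid (b1, b2) rest (c1, c2 + (n : Int))) := by
  intro n
  induction n with
  | zero =>
    intro rest c1 c2
    simp
    intro hx
    omega
  | succ n ih =>
    intro rest c1 c2
    rw [List.replicate_succ, List.cons_append]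
    have hstep : pvSimValid (b1, b2) ('>' :: (List.replicate n '>' ++ rest)) (c1, c2) =
        if ((c1, c2 + 1) : Int × Int) = (b1, b2) then false
        else pvSimValid (b1, b2) (List.replicate n '>' ++ rest) (c1, c2 + 1) := rfl
    rw [hstep]
    by_cases h : ((c1, c2 + 1) : Int × Int) = (b1, b2)
    · have hb : b1 = c1 ∧ c2 < b2 ∧ b2 ≤ c2 + ((n + 1 : Nat) : Int) := by simp [Prod.mk.injEq] at h; omega
      rw [if_pos h, decide_eq_true hb]
      simp
    · rw [if_neg h, ih]
      have hpt : c2 + 1 + (n : Int) = c2 + ((n + 1 : Nat) : Int) := by push_cast; ring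
      rw [hpt]
      have hAB : (b1 = c1 ∧ c2 + 1 < b2 ∧ b2 ≤ c2 + ((n + 1 : Nat) : Int)) ↔ (b1 = c1 ∧ c2 < b2 ∧ b2 ≤ c2 + ((n + 1 : Nat) : Int)) := by
        simp only [Prod.mk.injEq, not_and] at h
        constructor <;> intro hc <;> [skip; skip] <;> omega
      simp only [hAB]

lemma pv_sim_left (b1 b2 : Int) : ∀ (n : Nat) (rest : List Char) (c1 c2 : Int),
    pvSimValid (b1, b2) (List.replicate n '<' ++ rest) (c1, c2) =
      ((!decide (b1 = c1 ∧ c2 - (n : Int) ≤ b2 ∧ b2 < c2)) && pvSimValid (b1, b2) rest (c1, c2 - (n : Int))) := by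
  intro n
  induction n with
  | zero =>
    intro rest c1 c2
    simp
    intro hx
    omega
  | succ n ih =>
    intro rest c1 c2
    rw [List.replicate_succ, List.cons_append]
    have hstep : pvSimValid (b1, b2) ('<' :: (List.replicate n '<' ++ rest)) (c1, c2) =
        if ((c1, c2 - 1) : Int × Int) = (b1, b2) then false
        else pvSimValid (b1, b2) (List.replicate n '<' ++ rest) (c1, c2 - 1) := rfl
    rw [hstep]
    by_cases h : ((c1, c2 - 1) : Int × Int) = (b1, b2)
    · have hb : b1 = c1 ∧ c2 - ((n + 1 : Nat) : Int) ≤ b2 ∧ b2 < c2 := by simp [Prod.mk.injEq] at h; omega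
      rw [if_pos h, decide_eq_true hb]
      simp
    · rw [if_neg h, ih]
      have hpt : c2 - 1 - (n : Int) = c2 - ((n + 1 : Nat) : Int) := by push_cast; ring
      rw [hpt]
      have hAB : (b1 = c1 ∧ c2 - ((n + 1 : Nat) : Int) ≤ b2 ∧ b2 < c2 - 1) ↔ (b1 = c1 ∧ c2 - ((n + 1 : Nat) : Int) ≤ b2 ∧ b2 < c2) := by
        simp only [Prod.mk.injEq, not_and] at h
        constructor <;> intro hc <;> [skip; skip] <;> omega
      simp only [hAB]

lemma pv_sim_up (b1 b2 : Int) : ∀ (n : Nat) (rest : List Char) (c1 c2 : Int),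
    pvSimValid (b1, b2) (List.replicate n '^' ++ rest) (c1, c2) =
      ((!decide (b2 = c2 ∧ c1 - (n : Int) ≤ b1 ∧ b1 < c1)) && pvSimValid (b1, b2) rest (c1 - (n : Int), c2)) := by
  intro n
  induction n with
  | zero =>
    intro rest c1 c2
    simp
    intro hx
    omega
  | succ n ih =>
    intro rest c1 c2
    rw [List.replicate_succ, List.cons_append]
    have hstep : pvSimValid (b1, b2) ('^' :: (List.replicate n '^' ++ rest)) (c1, c2) =
        if ((c1 - 1, c2) : Int × Int) = (b1, b2) then false
        else pvSimValid (b1, b2) (List.replicate n '^' ++ rest) (c1 - 1, c2) := rfl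
    rw [hstep]
    by_cases h : ((c1 - 1, c2) : Int × Int) = (b1, b2)
    · have hb : b2 = c2 ∧ c1 - ((n + 1 : Nat) : Int) ≤ b1 ∧ b1 < c1 := by simp [Prod.mk.injEq] at h; omega
      rw [if_pos h, decide_eq_true hb]
      simp
    · rw [if_neg h, ih]
      have hpt : c1 - 1 - (n : Int) = c1 - ((n + 1 : Nat) : Int) := by push_cast; ring
      rw [hpt]
      have hAB : (b2 = c2 ∧ c1 - ((n + 1 : Nat) : Int) ≤ b1 ∧ b1 < c1 - 1) ↔ (b2 = c2 ∧ c1 - ((n + 1 : Nat) : Int) ≤ b1 ∧ b1 < c1) := by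
        simp only [Prod.mk.injEq, not_and] at h
        constructor <;> intro hc <;> [skip; skip] <;> omega
      simp only [hAB]

lemma pv_sim_down (b1 b2 : Int) : ∀ (n : Nat) (rest : List Char) (c1 c2 : Int),
    pvSimValid (b1, b2) (List.replicate n 'v' ++ rest) (c1, c2) =
      ((!decide (b2 = c2 ∧ c1 < b1 ∧ b1 ≤ c1 + (n : Int))) && pvSimValid (b1, b2) rest (c1 + (n : Int), c2)) := by
  intro n
  induction n with
  | zero =>
    intro rest c1 c2
    simp
    intro hx
    omega
  | succ n ih =>
    intro rest c1 c2
    rw [List.replicate_succ, List.cons_append]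
    have hstep : pvSimValid (b1, b2) ('v' :: (List.replicate n 'v' ++ rest)) (c1, c2) =
        if ((c1 + 1, c2) : Int × Int) = (b1, b2) then false
        else pvSimValid (b1, b2) (List.replicate n 'v' ++ rest) (c1 + 1, c2) := rfl
    rw [hstep]
    by_cases h : ((c1 + 1, c2) : Int × Int) = (b1, b2)
    · have hb : b2 = c2 ∧ c1 < b1 ∧ b1 ≤ c1 + ((n + 1 : Nat) : Int) := by simp [Prod.mk.injEq] at h; omega
      rw [if_pos h, decide_eq_true hb]
      simp
    · rw [if_neg h, ih]
      have hpt : c1 + 1 + (n : Int) = c1 + ((n + 1 : Nat) : Int) := by push_cast; ring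
      rw [hpt]
      have hAB : (b2 = c2 ∧ c1 + 1 < b1 ∧ b1 ≤ c1 + ((n + 1 : Nat) : Int)) ↔ (b2 = c2 ∧ c1 < b1 ∧ b1 ≤ c1 + ((n + 1 : Nat) : Int)) := by
        simp only [Prod.mk.injEq, not_and] at h
        constructor <;> intro hc <;> [skip; skip] <;> omega
      simp only [hAB]

lemma pv_sim_A (b cur : Int × Int) : pvSimValid b ['A'] cur = !decide (cur = b) := by
  have hstep : pvSimValid b ['A'] cur = if cur = b then false else pvSimValid b [] cur := rfl
  rw [hstep]
  by_cases h : cur = b <;> simp [h, pvSimValid]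

lemma pv_paths_eq (s e b : Int × Int) : pvPaths s e b = generate_direction_commands s e b := by
  obtain ⟨s1, s2⟩ := s; obtain ⟨e1, e2⟩ := e; obtain ⟨b1, b2⟩ := b
  simp only [pvPaths, generate_direction_commands, is_valid_direction_set]
  by_cases hdc : e2 - s2 > 0 <;> by_cases hdr : e1 - s1 < 0 <;>
    simp only [hdc, hdr, if_pos, ite_false]
  · -- hdc=True hdr=True
    have hv1 : pvSimValid (b1, b2) (String.ofList (List.replicate (e2 - s2).natAbs '>' ++ List.replicate (e1 - s1).natAbs '^' ++ ['A'])).toList (s1, s2)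
        = !(pvHseg s1 s2 e2 (b1, b2) || pvVseg e2 s1 e1 (b1, b2) || (b1, b2) == (e1, e2)) := by
      rw [String.toList_ofList, List.append_assoc, pv_sim_right]
      rw [show s2 + ((e2 - s2).natAbs : Int) = e2 from by omega]
      rw [pv_sim_up]
      rw [show s1 - ((e1 - s1).natAbs : Int) = e1 from by omega]
      rw [pv_sim_A, Bool.eq_iff_iff]
      simp [pvHseg, pvVseg, Prod.mk.injEq]
      omega
    have hv2 : pvSimValid (b1, b2) (String.ofList (List.replicate (e1 - s1).natAbs '^' ++ List.replicate (e2 - s2).natAbs '>' ++ ['A'])).toList (s1, s2)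
        = !(pvVseg s2 s1 e1 (b1, b2) || pvHseg e1 s2 e2 (b1, b2) || (b1, b2) == (e1, e2)) := by
      rw [String.toList_ofList, List.append_assoc, pv_sim_up]
      rw [show s1 - ((e1 - s1).natAbs : Int) = e1 from by omega]
      rw [pv_sim_right]
      rw [show s2 + ((e2 - s2).natAbs : Int) = e2 from by omega]
      rw [pv_sim_A, Bool.eq_iff_iff]
      simp [pvHseg, pvVseg, Prod.mk.injEq]
      omega
    simp only [List.filter_cons, List.filter_nil, hv1, hv2]
    split_ifs <;> simp
  · -- hdc=True hdr=False
    have hv1 : pvSimValid (b1, b2) (String.ofList (List.replicate (e2 - s2).natAbs '>' ++ List.replicate (e1 - s1).natAbs 'v' ++ ['A'])).toList (s1, s2)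
        = !(pvHseg s1 s2 e2 (b1, b2) || pvVseg e2 s1 e1 (b1, b2) || (b1, b2) == (e1, e2)) := by
      rw [String.toList_ofList, List.append_assoc, pv_sim_right]
      rw [show s2 + ((e2 - s2).natAbs : Int) = e2 from by omega]
      rw [pv_sim_down]
      rw [show s1 + ((e1 - s1).natAbs : Int) = e1 from by omega]
      rw [pv_sim_A, Bool.eq_iff_iff]
      simp [pvHseg, pvVseg, Prod.mk.injEq]
      omega
    have hv2 : pvSimValid (b1, b2) (String.ofList (List.replicate (e1 - s1).natAbs 'v' ++ List.replicate (e2 - s2).natAbs '>' ++ ['A'])).toList (s1, s2)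
        = !(pvVseg s2 s1 e1 (b1, b2) || pvHseg e1 s2 e2 (b1, b2) || (b1, b2) == (e1, e2)) := by
      rw [String.toList_ofList, List.append_assoc, pv_sim_down]
      rw [show s1 + ((e1 - s1).natAbs : Int) = e1 from by omega]
      rw [pv_sim_right]
      rw [show s2 + ((e2 - s2).natAbs : Int) = e2 from by omega]
      rw [pv_sim_A, Bool.eq_iff_iff]
      simp [pvHseg, pvVseg, Prod.mk.injEq]
      omega
    simp only [List.filter_cons, List.filter_nil, hv1, hv2]
    split_ifs <;> simp
  · -- hdc=False hdr=True
    have hv1 : pvSimValid (b1, b2) (String.ofList (List.replicate (e2 - s2).natAbs '<' ++ List.replicate (e1 - s1).natAbs '^' ++ ['A'])).toList (s1, s2)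
        = !(pvHseg s1 s2 e2 (b1, b2) || pvVseg e2 s1 e1 (b1, b2) || (b1, b2) == (e1, e2)) := by
      rw [String.toList_ofList, List.append_assoc, pv_sim_left]
      rw [show s2 - ((e2 - s2).natAbs : Int) = e2 from by omega]
      rw [pv_sim_up]
      rw [show s1 - ((e1 - s1).natAbs : Int) = e1 from by omega]
      rw [pv_sim_A, Bool.eq_iff_iff]
      simp [pvHseg, pvVseg, Prod.mk.injEq]
      omega
    have hv2 : pvSimValid (b1, b2) (String.ofList (List.replicate (e1 - s1).natAbs '^' ++ List.replicate (e2 - s2).natAbs '<' ++ ['A'])).toList (s1, s2)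
        = !(pvVseg s2 s1 e1 (b1, b2) || pvHseg e1 s2 e2 (b1, b2) || (b1, b2) == (e1, e2)) := by
      rw [String.toList_ofList, List.append_assoc, pv_sim_up]
      rw [show s1 - ((e1 - s1).natAbs : Int) = e1 from by omega]
      rw [pv_sim_left]
      rw [show s2 - ((e2 - s2).natAbs : Int) = e2 from by omega]
      rw [pv_sim_A, Bool.eq_iff_iff]
      simp [pvHseg, pvVseg, Prod.mk.injEq]
      omega
    simp only [List.filter_cons, List.filter_nil, hv1, hv2]
    split_ifs <;> simp
  · -- hdc=False hdr=False
    have hv1 : pvSimValid (b1, b2) (String.ofList (List.replicate (e2 - s2).natAbs '<' ++ List.replicate (e1 - s1).natAbs 'v' ++ ['A'])).toList (s1, s2)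
        = !(pvHseg s1 s2 e2 (b1, b2) || pvVseg e2 s1 e1 (b1, b2) || (b1, b2) == (e1, e2)) := by
      rw [String.toList_ofList, List.append_assoc, pv_sim_left]
      rw [show s2 - ((e2 - s2).natAbs : Int) = e2 from by omega]
      rw [pv_sim_down]
      rw [show s1 + ((e1 - s1).natAbs : Int) = e1 from by omega]
      rw [pv_sim_A, Bool.eq_iff_iff]
      simp [pvHseg, pvVseg, Prod.mk.injEq]
      omega
    have hv2 : pvSimValid (b1, b2) (String.ofList (List.replicate (e1 - s1).natAbs 'v' ++ List.replicate (e2 - s2).natAbs '<' ++ ['A'])).toList (s1, s2)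
        = !(pvVseg s2 s1 e1 (b1, b2) || pvHseg e1 s2 e2 (b1, b2) || (b1, b2) == (e1, e2)) := by
      rw [String.toList_ofList, List.append_assoc, pv_sim_down]
      rw [show s1 + ((e1 - s1).natAbs : Int) = e1 from by omega]
      rw [pv_sim_left]
      rw [show s2 - ((e2 - s2).natAbs : Int) = e2 from by omega]
      rw [pv_sim_A, Bool.eq_iff_iff]
      simp [pvHseg, pvVseg, Prod.mk.injEq]
      omega
    simp only [List.filter_cons, List.filter_nil, hv1, hv2]
    split_ifs <;> simp

-- ---- Part 2: both dict-building loops, flattened and compared key by key ----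

-- the grid's cells in scan order, as (char, position)
def pvCellsOf (grid : List (List String)) : List (String × Int × Int) :=
  (PySem.List.enumerate grid 0).flatMap (fun p =>
    (PySem.List.enumerate p.2 0).map (fun q => (q.2, p.1, q.1)))

-- the lexicographic product list (outer index varies slowest, as in both nested loops)
def pvProd {α β : Type} (L : List α) (M : List β) : List (α × β) :=
  L.flatMap (fun x => M.map (fun y => (x, y)))

lemma pv_flatten_pos (grid : List (List String)) :
    (PySem.List.enumerate grid 0).foldl (fun d p =>
        (PySem.List.enumerate p.2 0).foldl (fun d q => d.insert q.2 (p.1, q.1)) d)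
      PySem.Dict.empty
    = (pvCellsOf grid).foldl (fun d x => d.insert x.1 x.2) PySem.Dict.empty := by
  simp [pvCellsOf, List.foldl_flatMap, List.foldl_map]

lemma pv_flatten_A (grid : List (List String)) (blank : Int × Int) :
    (PySem.List.enumerate grid 0).foldl (fun d p =>
      (PySem.List.enumerate p.2 0).foldl (fun d q =>
        (PySem.List.enumerate grid 0).foldl (fun d r =>
          (PySem.List.enumerate r.2 0).foldl (fun d t =>
            d.insert (q.2, t.2) (generate_direction_commands (p.1, q.1) (r.1, t.1) blank)) d) d) d)
      PySem.Dict.empty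
    = (pvProd (pvCellsOf grid) (pvCellsOf grid)).foldl (fun d z =>
        d.insert (z.1.1, z.2.1) (generate_direction_commands z.1.2 z.2.2 blank))
        PySem.Dict.empty := by
  simp [pvProd, pvCellsOf, List.foldl_flatMap, List.foldl_map]

lemma pv_flatten_B (items : List (String × Int × Int)) (blank : Int × Int) :
    items.foldl (fun d x =>
      items.foldl (fun d y => d.insert (x.1, y.1) (pvPaths x.2 y.2 blank)) d)
      PySem.Dict.empty
    = (pvProd items items).foldl (fun d z =>
        d.insert (z.1.1, z.2.1) (pvPaths z.1.2 z.2.2 blank)) PySem.Dict.empty := by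
  simp [pvProd, List.foldl_flatMap, List.foldl_map]

-- get? after a loop of inserts: the LAST matching element wins
lemma pv_get_foldl_insert {κ ν β : Type} [BEq κ] [LawfulBEq κ] (key : β → κ) (v : β → ν) :
    ∀ (l : List β) (d : PySem.Dict κ ν) (k : κ),
    (l.foldl (fun d x => d.insert (key x) (v x)) d).get? k =
      ((l.filter (fun x => key x == k)).getLast?.elim (d.get? k) (fun x => some (v x))) := by
  intro l
  induction l with
  | nil => simp
  | cons x t ih =>
    intro d k
    rw [List.foldl_cons, ih, List.filter_cons]
    by_cases hk : key x == k
    · have hEq : key x = k := eq_of_beq hk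
      subst hEq
      rw [if_pos hk, List.getLast?_cons]
      cases h : (t.filter (fun y => key y == key x)).getLast? <;>
        simp [PySem.Dict.get?_insert_self]
    · have hne : k ≠ key x := fun he => hk (he ▸ BEq.rfl)
      rw [if_neg hk, PySem.Dict.get?_insert_of_ne _ _ hne]

lemma pv_getLast_pairs {α β : Type} (M : List β) : ∀ (L : List α),
    (pvProd L M).getLast? = L.getLast?.bind (fun x => M.getLast?.map (fun y => (x, y))) := by
  intro L
  induction L with
  | nil => simp [pvProd]
  | cons x L ih =>
    rw [show pvProd (x :: L) M = M.map (fun y => (x, y)) ++ pvProd L M from by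
          simp [pvProd]]
    rw [List.getLast?_append, ih, List.getLast?_cons]
    cases hL : L.getLast? <;> cases hM : M.getLast? <;>
      simp [hM, List.getLast?_map]

lemma pv_flatMap_if {α β : Type} (p : α → Bool) (g : α → List β) : ∀ (L : List α),
    (L.flatMap (fun x => if p x then g x else [])) = (L.filter p).flatMap g := by
  intro L
  induction L with
  | nil => simp
  | cons x L ih =>
    rw [List.flatMap_cons, List.filter_cons, ih]
    by_cases hx : p x <;> simp [hx]

-- filtering the product for one key pair = product of the two filtered lists
lemma pv_filter_pairs {σ τ : Type} [BEq σ] [LawfulBEq σ] (L M : List (σ × τ)) (c1 c2 : σ) :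
    (pvProd L M).filter (fun z => (z.1.1, z.2.1) == (c1, c2)) =
      pvProd (L.filter (fun x => x.1 == c1)) (M.filter (fun y => y.1 == c2)) := by
  unfold pvProd
  rw [List.filter_flatMap]
  have hin : ∀ x : σ × τ,
      ((M.map (fun y => (x, y))).filter (fun z => (z.1.1, z.2.1) == (c1, c2))) =
        if x.1 == c1 then (M.filter (fun y => y.1 == c2)).map (fun y => (x, y)) else [] := by
    intro x
    rw [List.filter_map]
    by_cases hx : x.1 == c1
    · rw [if_pos hx]
      congr 1
      apply List.filter_congr
      intro y _
      show ((x.1, y.1) == (c1, c2)) = (y.1 == c2)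
      show (x.1 == c1 && y.1 == c2) = (y.1 == c2)
      rw [hx, Bool.true_and]
    · rw [if_neg hx]
      have : M.filter ((fun z : (σ × τ) × σ × τ => (z.1.1, z.2.1) == (c1, c2)) ∘ (fun y => (x, y))) = [] := by
        apply List.filter_eq_nil_iff.mpr
        intro y _
        show ¬((x.1 == c1 && y.1 == c2) = true)
        simp only [Bool.and_eq_true]
        exact fun hc => hx hc.1
      rw [this, List.map_nil]
  simp only [hin]
  exact pv_flatMap_if _ _ L

-- in an association list with distinct keys, filtering for a present key gives the singleton
lemma pv_filter_nodup {κ ν : Type} [BEq κ] [LawfulBEq κ] : ∀ (l : List (κ × ν)) (c : κ) (v : ν),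
    (l.map Prod.fst).Nodup → (c, v) ∈ l → l.filter (fun p => p.1 == c) = [(c, v)] := by
  intro l
  induction l with
  | nil => intro c v _ h; cases h
  | cons x t ih =>
    intro c v hnd hm
    rw [List.map_cons, List.nodup_cons] at hnd
    rcases List.mem_cons.mp hm with he | ht
    · subst he
      rw [List.filter_cons, if_pos (by simp)]
      have : t.filter (fun p => p.1 == c) = [] := by
        apply List.filter_eq_nil_iff.mpr
        intro p hp hpc
        have hpc' : p.1 = c := by simpa using hpc
        have hm2 : p.1 ∈ t.map Prod.fst := List.mem_map_of_mem (f := Prod.fst) hp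
        rw [hpc'] at hm2
        exact hnd.1 hm2
      rw [this]
    · have hxc : ¬(x.1 == c) := by
        intro hbeq
        have : x.1 = c := by simpa using hbeq
        exact hnd.1 (this ▸ List.mem_map_of_mem (f := Prod.fst) ht)
      rw [List.filter_cons, if_neg (by simpa using hxc), ih c v hnd.2 ht]

-- dedup of the lexicographic product = product of the dedups
lemma pv_ofList_map_snd {σ : Type} [BEq σ] [LawfulBEq σ] (a : σ) : ∀ (M : List σ),
    PySem.Set.ofList (M.map (fun b => (a, b))) = (PySem.Set.ofList M).map (fun b => (a, b)) := by
  intro M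
  induction M using List.reverseRecOn with
  | nil => simp
  | append_singleton M m ih =>
    rw [List.map_append, List.map_singleton, PySem.Set.ofList_append_singleton,
        PySem.Set.ofList_append_singleton, ih, PySem.Set.add_eq_ite, PySem.Set.add_eq_ite]
    by_cases hm : m ∈ PySem.Set.ofList M
    · rw [if_pos (List.mem_map_of_mem hm), if_pos hm]
    · rw [if_neg (by
        intro hmem
        rcases List.mem_map.mp hmem with ⟨b, hb, he⟩
        cases he
        exact hm hb), if_neg hm, List.map_append, List.map_singleton]

lemma pv_ofList_pairs {σ : Type} [BEq σ] [LawfulBEq σ] (M : List σ) : ∀ (K : List σ),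
    PySem.Set.ofList (pvProd K M) = pvProd (PySem.Set.ofList K) (PySem.Set.ofList M) := by
  intro K
  induction K with
  | nil => simp [pvProd]
  | cons a K ih =>
    rw [show pvProd (a :: K) M = M.map (fun b => (a, b)) ++ pvProd K M from by simp [pvProd]]
    rw [PySem.Set.ofList_append, PySem.Set.update_eq_append_filter, ih, pv_ofList_map_snd]
    rw [show pvProd (PySem.Set.ofList (a :: K)) (PySem.Set.ofList M)
          = (PySem.Set.ofList M).map (fun b => (a, b))
            ++ pvProd (PySem.Set.discard (PySem.Set.ofList K) a) (PySem.Set.ofList M) from by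
        rw [PySem.Set.ofList_cons]; simp [pvProd]]
    congr 1
    unfold pvProd
    rw [List.filter_flatMap]
    have hin : ∀ x : σ,
        ((PySem.Set.ofList M).map (fun y => (x, y))).filter
            (fun z => !(PySem.Set.contains ((PySem.Set.ofList M).map (fun b => (a, b))) z)) =
          if !(x == a) then (PySem.Set.ofList M).map (fun y => (x, y)) else [] := by
      intro x
      by_cases hx : x == a
      · have hxa : x = a := eq_of_beq hx
        subst hxa
        rw [if_neg (by simp)]
        apply List.filter_eq_nil_iff.mpr
        intro z hz
        simp only [Bool.not_eq_true', Bool.not_eq_false]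
        simpa using hz
      · rw [if_pos (by simpa using hx)]
        apply List.filter_eq_self.mpr
        intro z hz
        rcases List.mem_map.mp hz with ⟨b, _, he⟩
        subst he
        simp only [Bool.not_eq_true', PySem.Set.contains_eq_listContains,
          List.contains_eq_mem, decide_eq_false_iff_not]
        intro hmem
        rcases List.mem_map.mp hmem with ⟨b', _, he'⟩
        injection he' with h1 h2
        exact hx (by rw [← h1]; simp)
    simp only [hin]
    rw [pv_flatMap_if]
    rfl

-- membership in a product list
lemma pv_mem_prod {α β : Type} (L : List α) (M : List β) (a : α) (b : β) :
    (a, b) ∈ pvProd L M ↔ a ∈ L ∧ b ∈ M := by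
  simp only [pvProd, List.mem_flatMap, List.mem_map, Prod.mk.injEq]
  constructor
  · rintro ⟨x, hx, y, hy, h1, h2⟩; subst h1; subst h2; exact ⟨hx, hy⟩
  · rintro ⟨ha, hb⟩; exact ⟨a, ha, b, hb, rfl, rfl⟩

-- the heart: both insert loops build the same dict, for ANY value function w
theorem pv_main {κ ρ ν : Type} [BEq κ] [LawfulBEq κ] (C : List (κ × ρ)) (w : ρ → ρ → ν) (dflt : ν) :
    (pvProd C C).foldl (fun d z => d.insert (z.1.1, z.2.1) (w z.1.2 z.2.2)) PySem.Dict.empty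
    = (pvProd ((C.foldl (fun d x => d.insert x.1 x.2) PySem.Dict.empty).items)
              ((C.foldl (fun d x => d.insert x.1 x.2) PySem.Dict.empty).items)).foldl
        (fun d z => d.insert (z.1.1, z.2.1) (w z.1.2 z.2.2)) PySem.Dict.empty := by
  have hposkeys : (C.foldl (fun d x => d.insert x.1 x.2) PySem.Dict.empty).keys
      = PySem.Set.ofList (C.map (fun x => x.1)) := by
    rw [PySem.Dict.keys_foldl_insert_key C (fun x => x.1) (fun _ x => x.2) PySem.Dict.empty]
    rw [show (PySem.Dict.empty : PySem.Dict κ ρ).keys = [] from rfl]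
    rw [PySem.Set.update_nil_left]
  have hposnodup : ((C.foldl (fun d x => d.insert x.1 x.2) PySem.Dict.empty).keys).Nodup := by
    rw [hposkeys]; exact PySem.Set.nodup_ofList _
  have hposget : ∀ c : κ, (C.foldl (fun d x => d.insert x.1 x.2) PySem.Dict.empty).get? c
      = ((C.filter (fun x => x.1 == c)).getLast?.elim none (fun x => some x.2)) := by
    intro c
    have h := pv_get_foldl_insert (fun x : κ × ρ => x.1) (fun x : κ × ρ => x.2) C PySem.Dict.empty c
    rw [show (PySem.Dict.empty : PySem.Dict κ ρ).get? c = none from rfl] at h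
    exact h
  have hkA : ((pvProd C C).foldl (fun d z => d.insert (z.1.1, z.2.1) (w z.1.2 z.2.2)) PySem.Dict.empty).keys
      = pvProd (PySem.Set.ofList (C.map (fun x => x.1))) (PySem.Set.ofList (C.map (fun x => x.1))) := by
    rw [PySem.Dict.keys_foldl_insert_key (pvProd C C) (fun z => (z.1.1, z.2.1)) (fun _ z => w z.1.2 z.2.2) PySem.Dict.empty]
    rw [show (PySem.Dict.empty : PySem.Dict (κ × κ) ν).keys = [] from rfl]
    rw [PySem.Set.update_nil_left]
    rw [show (pvProd C C).map (fun z => (z.1.1, z.2.1)) = pvProd (C.map (fun x => x.1)) (C.map (fun x => x.1)) from by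
      simp [pvProd, List.map_flatMap, List.flatMap_map, List.map_map, Function.comp_def]]
    exact pv_ofList_pairs _ _
  have hkB : ∀ (l : List (κ × ρ)), (l.map (fun x => x.1)).Nodup →
      ((pvProd l l).foldl (fun d z => d.insert (z.1.1, z.2.1) (w z.1.2 z.2.2)) PySem.Dict.empty).keys
      = pvProd (l.map (fun x => x.1)) (l.map (fun x => x.1)) := by
    intro l hnd
    rw [PySem.Dict.keys_foldl_insert_key (pvProd l l) (fun z => (z.1.1, z.2.1)) (fun _ z => w z.1.2 z.2.2) PySem.Dict.empty]
    rw [show (PySem.Dict.empty : PySem.Dict (κ × κ) ν).keys = [] from rfl]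
    rw [PySem.Set.update_nil_left]
    rw [show (pvProd l l).map (fun z => (z.1.1, z.2.1)) = pvProd (l.map (fun x => x.1)) (l.map (fun x => x.1)) from by
      simp [pvProd, List.map_flatMap, List.flatMap_map, List.map_map, Function.comp_def]]
    rw [pv_ofList_pairs, PySem.Set.ofList_eq_self_of_nodup _ hnd]
  have hnA : (((pvProd C C).foldl (fun d z => d.insert (z.1.1, z.2.1) (w z.1.2 z.2.2)) PySem.Dict.empty).keys).Nodup :=
    PySem.Dict.nodup_keys_foldl_insert_key _ _ _ _ (by rw [show (PySem.Dict.empty : PySem.Dict (κ × κ) ν).keys = [] from rfl]; exact List.nodup_nil)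
  have hnB : ((((pvProd ((C.foldl (fun d x => d.insert x.1 x.2) PySem.Dict.empty).items) ((C.foldl (fun d x => d.insert x.1 x.2) PySem.Dict.empty).items)).foldl (fun d z => d.insert (z.1.1, z.2.1) (w z.1.2 z.2.2)) PySem.Dict.empty)).keys).Nodup :=
    PySem.Dict.nodup_keys_foldl_insert_key _ _ _ _ (by rw [show (PySem.Dict.empty : PySem.Dict (κ × κ) ν).keys = [] from rfl]; exact List.nodup_nil)
  have hkeysEq : ((pvProd C C).foldl (fun d z => d.insert (z.1.1, z.2.1) (w z.1.2 z.2.2)) PySem.Dict.empty).keys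
      = (((pvProd ((C.foldl (fun d x => d.insert x.1 x.2) PySem.Dict.empty).items) ((C.foldl (fun d x => d.insert x.1 x.2) PySem.Dict.empty).items)).foldl (fun d z => d.insert (z.1.1, z.2.1) (w z.1.2 z.2.2)) PySem.Dict.empty)).keys := by
    rw [hkA, hkB _ hposnodup,
        show (List.map (fun x : κ × ρ => x.1) ((C.foldl (fun d x => d.insert x.1 x.2) PySem.Dict.empty).items)) = (C.foldl (fun d x => d.insert x.1 x.2) PySem.Dict.empty).keys from rfl,
        hposkeys]
  have hget : ∀ c1 c2 : κ, (c1, c2) ∈ ((pvProd C C).foldl (fun d z => d.insert (z.1.1, z.2.1) (w z.1.2 z.2.2)) PySem.Dict.empty).keys →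
      ((pvProd C C).foldl (fun d z => d.insert (z.1.1, z.2.1) (w z.1.2 z.2.2)) PySem.Dict.empty).get? (c1, c2)
      = (((pvProd ((C.foldl (fun d x => d.insert x.1 x.2) PySem.Dict.empty).items) ((C.foldl (fun d x => d.insert x.1 x.2) PySem.Dict.empty).items)).foldl (fun d z => d.insert (z.1.1, z.2.1) (w z.1.2 z.2.2)) PySem.Dict.empty)).get? (c1, c2) := by
    intro c1 c2 hk
    rw [hkA] at hk
    have hmem := (pv_mem_prod _ _ _ _).mp hk
    have h1 : (C.filter (fun x => x.1 == c1)) ≠ [] := by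
      rcases List.mem_map.mp ((PySem.Set.mem_ofList _ _).mp hmem.1) with ⟨x, hxC, hx1⟩
      intro hnil
      exact absurd (by simp [hx1] : (x.1 == c1) = true)
        (by simpa using List.filter_eq_nil_iff.mp hnil x hxC)
    have h2 : (C.filter (fun x => x.1 == c2)) ≠ [] := by
      rcases List.mem_map.mp ((PySem.Set.mem_ofList _ _).mp hmem.2) with ⟨x, hxC, hx1⟩
      intro hnil
      exact absurd (by simp [hx1] : (x.1 == c2) = true)
        (by simpa using List.filter_eq_nil_iff.mp hnil x hxC)
    obtain ⟨x1, hx1⟩ : ∃ x, (C.filter (fun x => x.1 == c1)).getLast? = some x := by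
      cases h : (C.filter (fun x => x.1 == c1)).getLast? with
      | none => exact absurd (List.getLast?_eq_none_iff.mp h) h1
      | some x => exact ⟨x, rfl⟩
    obtain ⟨x2, hx2⟩ : ∃ x, (C.filter (fun x => x.1 == c2)).getLast? = some x := by
      cases h : (C.filter (fun x => x.1 == c2)).getLast? with
      | none => exact absurd (List.getLast?_eq_none_iff.mp h) h2
      | some x => exact ⟨x, rfl⟩
    -- A side
    rw [pv_get_foldl_insert (fun z : (κ × ρ) × κ × ρ => (z.1.1, z.2.1)) (fun z => w z.1.2 z.2.2) (pvProd C C) PySem.Dict.empty (c1, c2)]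
    rw [show ((pvProd C C).filter (fun z => ((fun z : (κ × ρ) × κ × ρ => (z.1.1, z.2.1)) z) == (c1, c2))) = pvProd (C.filter (fun x => x.1 == c1)) (C.filter (fun x => x.1 == c2)) from pv_filter_pairs C C c1 c2]
    rw [pv_getLast_pairs, hx1, hx2]
    -- B side
    have hi1 : ((C.foldl (fun d x => d.insert x.1 x.2) PySem.Dict.empty).items).filter (fun p => p.1 == c1) = [(c1, x1.2)] := by
      apply pv_filter_nodup _ _ _ hposnodup
      apply PySem.Dict.mem_items_of_get?_eq_some
      rw [hposget, hx1]
      rfl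
    have hi2 : ((C.foldl (fun d x => d.insert x.1 x.2) PySem.Dict.empty).items).filter (fun p => p.1 == c2) = [(c2, x2.2)] := by
      apply pv_filter_nodup _ _ _ hposnodup
      apply PySem.Dict.mem_items_of_get?_eq_some
      rw [hposget, hx2]
      rfl
    rw [pv_get_foldl_insert (fun z : (κ × ρ) × κ × ρ => (z.1.1, z.2.1)) (fun z => w z.1.2 z.2.2) _ PySem.Dict.empty (c1, c2)]
    rw [show ((pvProd ((C.foldl (fun d x => d.insert x.1 x.2) PySem.Dict.empty).items) ((C.foldl (fun d x => d.insert x.1 x.2) PySem.Dict.empty).items)).filter (fun z => ((fun z : (κ × ρ) × κ × ρ => (z.1.1, z.2.1)) z) == (c1, c2))) = pvProd (((C.foldl (fun d x => d.insert x.1 x.2) PySem.Dict.empty).items).filter (fun p => p.1 == c1)) (((C.foldl (fun d x => d.insert x.1 x.2) PySem.Dict.empty).items).filter (fun p => p.1 == c2)) from pv_filter_pairs _ _ c1 c2]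
    rw [hi1, hi2, pv_getLast_pairs]
    rfl
  apply PySem.Dict.ext
  rw [PySem.Dict.items_eq_map_keys _ hnA dflt, PySem.Dict.items_eq_map_keys _ hnB dflt, ← hkeysEq]
  apply List.map_eq_map_iff.mpr
  intro k hkmem
  obtain ⟨c1, c2⟩ := k
  rw [PySem.Dict.getD_eq_get?_getD, PySem.Dict.getD_eq_get?_getD, hget c1 c2 hkmem]

-- ===== VERDICT (by name: the statement is the Claim_ definition above) =====
theorem preprocess_grid_to_directions_spec : Claim_equal_preprocess_grid_to_directions := by
  intro button_grid blank_point _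
  unfold Spec_preprocess_grid_to_directions
  unfold preprocess_grid_to_directions preprocess_grid_to_directions_alt
  dsimp only
  rw [pv_flatten_A, pv_flatten_pos, pv_flatten_B]
  simp only [pv_paths_eq]
  rw [pv_main (pvCellsOf button_grid) (fun p q => generate_direction_commands p q blank_point) []]
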